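-- pv_equiv track=rewrite | github.com/pankajdhawale/EQUIP9_Pankaj_Sol | Assignment3.py | maintenance_costs
-- ===== SOURCE A (Python) =====
-- class FenwickTree:
--     def __init__(self, n):
--         self.tree = [0] * (n + 1)
--
--     def update(self, idx, value):
--         while idx < len(self.tree):
--             self.tree[idx] += value
--             idx += idx & -idx  # Move to next index
--
--     def prefix_sum(self, idx):
--         total = 0
--         while idx > 0:
--             total += self.tree[idx]
--             idx -= idx & -idx  # Move to parent index
--         return total
--
--     def range_sum(self, left, right):
--         return self.prefix_sum(right) - self.prefix_sum(left - 1)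
--
-- def maintenance_costs(maintenance_logs, queries):
--     date_map = {}
--     sorted_dates = sorted(set(date for _, date, _ in maintenance_logs))
--
--     for i, date in enumerate(sorted_dates):
--         date_map[date] = i + 1  # 1-based indexing for BIT
--
--     fenwick = FenwickTree(len(sorted_dates))
--
--     for _, date, cost in maintenance_logs:
--         fenwick.update(date_map[date], cost)
--
--     results = []
--     for start_date, end_date in queries:
--         if start_date in date_map and end_date in date_map:
--             results.append(fenwick.range_sum(date_map[start_date], date_map[end_date]))
--         else:
--             results.append(0)
--
--     return results
-- ===== SOURCE B (Python) =====
-- def maintenance_costs(maintenance_logs, queries):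
--     totals = {}
--     for _, date, cost in maintenance_logs:
--         totals[date] = totals.get(date, 0) + cost
--
--     cum_before = {}   # sum of totals over dates strictly before this date
--     cum_thru = {}     # sum of totals over dates up to and including this date
--     running = 0
--     for date in sorted(totals):
--         cum_before[date] = running
--         running += totals[date]
--         cum_thru[date] = running
--
--     results = []
--     for start_date, end_date in queries:
--         if start_date in cum_thru and end_date in cum_thru:
--             results.append(cum_thru[end_date] - cum_before[start_date])
--         else:
--             results.append(0)
--     return results
-- ===== Notes on version B (the rewrite author's own statement) =====
-- stated objective: faster
-- what changed: Replaces the Fenwick (binary indexed) tree and its O(log n) update/query loops by one aggregation pass into per-date totals followed by a single cumulative-sum sweep over the sorted dates, so every query is answered by one O(1) dict subtraction.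
import Mathlib
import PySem

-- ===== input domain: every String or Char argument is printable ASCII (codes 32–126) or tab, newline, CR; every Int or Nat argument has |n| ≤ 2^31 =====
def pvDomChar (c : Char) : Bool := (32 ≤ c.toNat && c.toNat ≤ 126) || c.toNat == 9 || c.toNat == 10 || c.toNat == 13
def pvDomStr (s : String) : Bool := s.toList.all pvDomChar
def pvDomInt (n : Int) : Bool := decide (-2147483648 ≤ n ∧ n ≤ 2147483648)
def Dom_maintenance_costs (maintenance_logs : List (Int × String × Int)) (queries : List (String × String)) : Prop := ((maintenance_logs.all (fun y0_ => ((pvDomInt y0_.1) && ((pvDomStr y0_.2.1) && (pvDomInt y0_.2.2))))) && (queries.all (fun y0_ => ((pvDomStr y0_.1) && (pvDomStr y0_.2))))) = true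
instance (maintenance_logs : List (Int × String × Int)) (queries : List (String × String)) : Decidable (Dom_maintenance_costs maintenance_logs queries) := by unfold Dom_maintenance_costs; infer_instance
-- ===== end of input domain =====

-- B replaces A's Fenwick (binary indexed) tree by per-date totals plus one cumulative-sum
-- sweep over the sorted dates, answering each query with a single O(1) subtraction.

-- ===== PORT A =====
-- FenwickTree.update: `while idx < len(tree): tree[idx] += value; idx += idx & -idx`.
-- The while loop is ported with fuel = tree.length, enough for every call the program
-- makes (idx starts ≥ 1 and strictly increases each iteration while idx < tree.length).
-- tree[idx] is read with getD (exact here: every executed access has 1 ≤ idx < len(tree)).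
def pvFenUpdate : Nat → List Int → Int → Int → List Int
  | 0, tree, _, _ => tree
  | fuel+1, tree, idx, value =>
    if idx < (tree.length : Int) then
      pvFenUpdate fuel (tree.set idx.toNat (tree.getD idx.toNat 0 + value))
        (idx + PySem.Int.band idx (-idx)) value
    else tree

-- FenwickTree.prefix_sum: `total = 0; while idx > 0: total += tree[idx]; idx -= idx & -idx`.
-- Ported with fuel = idx.toNat (idx decreases by ≥ 1 per iteration while idx > 0).
def pvFenPrefix : Nat → List Int → Int → Int → Int
  | 0, _, _, total => total
  | fuel+1, tree, idx, total =>
    if 0 < idx then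
      pvFenPrefix fuel tree (idx - PySem.Int.band idx (-idx)) (total + tree.getD idx.toNat 0)
    else total

-- FenwickTree.range_sum
def pvRangeSum (tree : List Int) (left right : Int) : Int :=
  pvFenPrefix right.toNat tree right 0 - pvFenPrefix (left - 1).toNat tree (left - 1) 0

-- the generator expression `date for _, date, _ in maintenance_logs`
def pvDates (maintenance_logs : List (Int × String × Int)) : List String :=
  maintenance_logs.map (fun x => x.2.1)

-- `sorted_dates = sorted(set(...))`
def pvSortedDates (maintenance_logs : List (Int × String × Int)) : List String :=
  PySem.List.sorted (PySem.Set.ofList (pvDates maintenance_logs)) (fun d => d)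

-- `for i, date in enumerate(sorted_dates): date_map[date] = i + 1`
def pvDateMap (maintenance_logs : List (Int × String × Int)) : PySem.Dict String Int :=
  (PySem.List.enumerate (pvSortedDates maintenance_logs)).foldl
    (fun d p => d.insert p.2 (p.1 + 1)) PySem.Dict.empty

-- `fenwick = FenwickTree(len(sorted_dates))` then `for _, date, cost: fenwick.update(...)`
def pvFen (maintenance_logs : List (Int × String × Int)) : List Int :=
  maintenance_logs.foldl
    (fun t x => pvFenUpdate t.length t ((pvDateMap maintenance_logs).getD x.2.1 0) x.2.2)
    (List.replicate ((pvSortedDates maintenance_logs).length + 1) (0 : Int))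

def maintenance_costs (maintenance_logs : List (Int × String × Int)) (queries : List (String × String)) : List Int :=
  queries.map (fun q =>
    if (pvDateMap maintenance_logs).contains q.1 && (pvDateMap maintenance_logs).contains q.2 then
      pvRangeSum (pvFen maintenance_logs)
        ((pvDateMap maintenance_logs).getD q.1 0) ((pvDateMap maintenance_logs).getD q.2 0)
    else 0)

-- ===== PORT B =====
-- `totals[date] = totals.get(date, 0) + cost`
def pvTotals (maintenance_logs : List (Int × String × Int)) : PySem.Dict String Int :=
  maintenance_logs.foldl
    (fun d x => d.insert x.2.1 (d.getD x.2.1 0 + x.2.2)) PySem.Dict.empty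

-- one iteration of the sweep, state = (cum_before, cum_thru, running)
def pvSweepStep (totals : PySem.Dict String Int)
    (acc : PySem.Dict String Int × PySem.Dict String Int × Int) (dte : String) :
    PySem.Dict String Int × PySem.Dict String Int × Int :=
  (acc.1.insert dte acc.2.2,
   acc.2.1.insert dte (acc.2.2 + totals.getD dte 0),
   acc.2.2 + totals.getD dte 0)

-- `for date in sorted(totals): ...`
def pvSweepSt (maintenance_logs : List (Int × String × Int)) :
    PySem.Dict String Int × PySem.Dict String Int × Int :=
  (PySem.List.sorted (pvTotals maintenance_logs).keys (fun d => d)).foldl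
    (pvSweepStep (pvTotals maintenance_logs)) (PySem.Dict.empty, PySem.Dict.empty, 0)

def maintenance_costs_alt (maintenance_logs : List (Int × String × Int)) (queries : List (String × String)) : List Int :=
  queries.map (fun q =>
    if (pvSweepSt maintenance_logs).2.1.contains q.1 && (pvSweepSt maintenance_logs).2.1.contains q.2 then
      (pvSweepSt maintenance_logs).2.1.getD q.2 0 - (pvSweepSt maintenance_logs).1.getD q.1 0
    else 0)

-- ===== PRECONDITION & SPEC =====
def Spec_maintenance_costs (maintenance_logs : List (Int × String × Int)) (queries : List (String × String)) (out : List Int) : Prop := out = maintenance_costs_alt maintenance_logs queries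
instance (maintenance_logs : List (Int × String × Int)) (queries : List (String × String)) (out : List Int) : Decidable (Spec_maintenance_costs maintenance_logs queries out) := by unfold Spec_maintenance_costs; infer_instance

-- ===== CLAIM (what is proved, stated in full; the proofs are below) =====
def Claim_equal_maintenance_costs : Prop := ∀ (maintenance_logs : List (Int × String × Int)) (queries : List (String × String)), Dom_maintenance_costs maintenance_logs queries → Spec_maintenance_costs maintenance_logs queries (maintenance_costs maintenance_logs queries)

-- ===== LEMMAS AND PROOFS =====

-- `idx & -idx` of a positive idx, as a Nat: the lowest set bit.
def pvLb (n : Nat) : Nat := n - (n &&& (n - 1))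

theorem pvBand_eq (n : Nat) (h : 0 < n) :
    PySem.Int.band (n : Int) (-(n : Int)) = ((pvLb n : Nat) : Int) := by
  unfold PySem.Int.band pvLb
  have h1 : (0:Int) ≤ (n:Int) := by positivity
  have h2 : ¬ (0:Int) ≤ -(n:Int) := by omega
  simp only [if_pos h1, if_neg h2, neg_neg]
  have e1 : ((n:Int)).toNat = n := Int.toNat_natCast n
  have e2 : ((n:Int) - 1).toNat = n - 1 := by omega
  rw [e1, e2]

theorem pvLb_odd (n : Nat) (h : n % 2 = 1) : pvLb n = 1 := by
  obtain ⟨m, rfl⟩ : ∃ m, n = 2*m + 1 := ⟨n/2, by omega⟩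
  have hb : (2*m+1) &&& (2*m) = 2*m := by
    have := Nat.land_bit true m false m
    simpa [Nat.bit_val, Nat.and_self] using this
  unfold pvLb
  simp only [Nat.add_sub_cancel, hb]
  omega

theorem pvLb_even (m : Nat) (h : 0 < m) : pvLb (2*m) = 2 * pvLb m := by
  have hrw : 2*m - 1 = 2*(m-1) + 1 := by omega
  have hb : (2*m) &&& (2*m - 1) = 2 * (m &&& (m-1)) := by
    rw [hrw]
    have := Nat.land_bit false m true (m-1)
    simpa [Nat.bit_val] using this
  have hle : m &&& (m-1) ≤ m := Nat.and_le_left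
  unfold pvLb
  rw [hb]
  omega

theorem pvLb_rep (a k : Nat) : pvLb ((2*a+1) * 2^k) = 2^k := by
  induction k with
  | zero => simpa using pvLb_odd (2*a+1) (by omega)
  | succ k ih =>
      have h1 : (2*a+1) * 2^(k+1) = 2 * ((2*a+1) * 2^k) := by ring
      have hpos : 0 < (2*a+1) * 2^k := by positivity
      rw [h1, pvLb_even _ hpos, ih, pow_succ]
      ring

theorem pvRep (n : Nat) (h : 0 < n) : ∃ a k, n = (2*a+1) * 2^k := by
  obtain ⟨k, m, hm, he⟩ := Nat.exists_eq_two_pow_mul_odd h.ne'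
  obtain ⟨a, rfl⟩ := hm
  exact ⟨a, k, by rw [he]; ring⟩

theorem pvLb_pos (n : Nat) (h : 0 < n) : 0 < pvLb n := by
  obtain ⟨a, k, rfl⟩ := pvRep n h
  rw [pvLb_rep]; positivity

theorem pvLb_le (n : Nat) (h : 0 < n) : pvLb n ≤ n := by
  obtain ⟨a, k, rfl⟩ := pvRep n h
  rw [pvLb_rep]
  calc 2^k = 1 * 2^k := by ring
    _ ≤ (2*a+1) * 2^k := Nat.mul_le_mul_right _ (by omega)

-- adding r < lowbit(idx) to idx leaves the low bits alone
theorem pvLb_add (idx r : Nat) (hidx : 0 < idx) (h0 : 0 < r) (h : r < pvLb idx) :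
    pvLb (idx + r) = pvLb r := by
  obtain ⟨a, k, rfl⟩ := pvRep idx hidx
  rw [pvLb_rep] at h
  obtain ⟨b, j, rfl⟩ := pvRep r h0
  have hj : 2^j ≤ (2*b+1) * 2^j := by
    calc 2^j = 1 * 2^j := by ring
      _ ≤ (2*b+1) * 2^j := Nat.mul_le_mul_right _ (by omega)
  have hjk : j < k := by
    by_contra hc
    have : 2^k ≤ 2^j := Nat.pow_le_pow_right (by norm_num) (by omega)
    omega
  obtain ⟨k', rfl⟩ : ∃ k', k = k' + 1 + j := ⟨k - j - 1, by omega⟩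
  have hsplit : (2*a+1) * 2^(k'+1+j) + (2*b+1) * 2^j
      = (2*((2*a+1)*2^k' + b) + 1) * 2^j := by ring
  rw [hsplit, pvLb_rep, pvLb_rep]

-- The update chain from idx covers exactly the i with i - lowbit i < idx ≤ i,
-- and peeling idx off leaves the chain from idx + lowbit idx.
theorem pvCover (idx i : Nat) (hidx : 0 < idx) :
    (idx ≤ i ∧ i - pvLb i < idx) ↔
    (i = idx ∨ (idx + pvLb idx ≤ i ∧ i - pvLb i < idx + pvLb idx)) := by
  have hlbidx := pvLb_pos idx hidx
  constructor
  · rintro ⟨h1, h2⟩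
    by_cases he : i = idx
    · exact Or.inl he
    · right
      have hi : idx < i := lt_of_le_of_ne h1 (Ne.symm he)
      constructor
      · by_contra hc
        push Not at hc
        set r := i - idx with hr
        have hr0 : 0 < r := by omega
        have hrlt : r < pvLb idx := by omega
        have : pvLb i = pvLb r := by
          have : i = idx + r := by omega
          rw [this]; exact pvLb_add idx r hidx hr0 hrlt
        have hlbr : pvLb r ≤ r := pvLb_le r hr0
        omega
      · omega
  · rintro (rfl | ⟨h1, h2⟩)
    · exact ⟨le_refl _, by omega⟩
    · have hi : 0 < i := by omega
      refine ⟨by omega, ?_⟩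
      by_contra hc
      push Not at hc
      -- idx ≤ i - pvLb i < idx + pvLb idx : impossible
      obtain ⟨a, k, hidxe⟩ := pvRep idx hidx
      have hL : pvLb idx = 2^k := by rw [hidxe]; exact pvLb_rep a k
      obtain ⟨c, m, hie⟩ := pvRep i hi
      have hK : pvLb i = 2^m := by rw [hie]; exact pvLb_rep c m
      have hKle : pvLb i ≤ i := pvLb_le i hi
      by_cases hmk : k ≤ m
      · -- i - K is an even multiple of 2^k inside [(2a+1)2^k, (2a+2)2^k)
        obtain ⟨m', hm'⟩ : ∃ m', m = m' + k := ⟨m - k, by omega⟩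
        have hiK : i - pvLb i = (2 * (c * 2^m')) * 2^k := by
          rw [hK, hie, hm']
          have hx : (2*c+1) * 2^(m'+k) = (2 * (c * 2^m')) * 2^k + 2^(m'+k) := by ring
          have hy : (2:Nat)^(m'+k) = 2^m' * 2^k := by ring
          omega
        set e := 2 * (c * 2^m') with he
        have hlow : (2*a+1) * 2^k ≤ e * 2^k := by rw [← hiK, ← hidxe]; exact hc
        have hhigh : e * 2^k < (2*a+2) * 2^k := by
          have : i - pvLb i < idx + pvLb idx := h2
          rw [hiK, hL, hidxe] at this
          calc e * 2^k < (2*a+1) * 2^k + 2^k := this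
            _ = (2*a+2) * 2^k := by ring
        have hp : 0 < 2^k := pow_pos (by norm_num) k
        have h1' : 2*a+1 ≤ e := Nat.le_of_mul_le_mul_right hlow hp
        have h2' : e < 2*a+2 := Nat.lt_of_mul_lt_mul_right hhigh
        omega
      · -- k > m : i is an odd multiple of 2^m inside [(2a+2)2^k, (2a+2)2^k + 2^m)
        have hmk' : m < k := by omega
        obtain ⟨k', hk'⟩ : ∃ k', k = k' + 1 + m := ⟨k - m - 1, by omega⟩
        have hup : idx + pvLb idx = (2 * ((a+1) * 2^(k'+1))) * 2^m := by
          rw [hL, hidxe, hk']; ring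
        set g := 2 * ((a+1) * 2^(k'+1)) with hg
        have hlow : g * 2^m ≤ (2*c+1) * 2^m := by rw [← hup, ← hie]; exact h1
        have hhigh : (2*c+1) * 2^m < (g+1) * 2^m := by
          have : i < idx + pvLb idx + pvLb i := by omega
          rw [hK, hie, hup] at this
          calc (2*c+1) * 2^m < g * 2^m + 2^m := this
            _ = (g+1) * 2^m := by ring
        have hp : 0 < 2^m := pow_pos (by norm_num) m
        have h1' : g ≤ 2*c+1 := Nat.le_of_mul_le_mul_right hlow hp
        have h2' : 2*c+1 < g+1 := Nat.lt_of_mul_lt_mul_right hhigh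
        omega

theorem pvGetD_set (l : List Int) (i j : Nat) (x : Int) :
    (l.set i x).getD j 0 = if j = i ∧ i < l.length then x else l.getD j 0 := by
  rw [List.getD_eq_getElem?_getD, List.getD_eq_getElem?_getD, List.getElem?_set]
  by_cases h1 : i = j
  · subst h1
    by_cases h2 : i < l.length
    · simp [h2]
    · simp [h2]
  · have hn : ¬ (j = i ∧ i < l.length) := fun hh => h1 hh.1.symm
    simp [h1, hn]

theorem pvUpd_len (fuel : Nat) : ∀ (tree : List Int) (idx v : Int),
    (pvFenUpdate fuel tree idx v).length = tree.length := by
  induction fuel with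
  | zero => intro tree idx v; rfl
  | succ fuel ih =>
      intro tree idx v
      unfold pvFenUpdate
      split
      · rw [ih]; simp
      · rfl

theorem pvUpd_getD (fuel : Nat) : ∀ (tree : List Int) (pos : Nat) (v : Int),
    0 < pos → tree.length ≤ fuel + pos → ∀ j : Nat,
    (pvFenUpdate fuel tree (pos : Int) v).getD j 0
      = tree.getD j 0 + (if pos ≤ j ∧ j < tree.length ∧ j - pvLb j < pos then v else 0) := by
  induction fuel with
  | zero =>
      intro tree pos v hpos hfu j
      unfold pvFenUpdate
      rw [if_neg (by omega)]
      ring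
  | succ fuel ih =>
      intro tree pos v hpos hfu j
      unfold pvFenUpdate
      by_cases hg : (pos : Int) < (tree.length : Int)
      · rw [if_pos hg]
        have hlt : pos < tree.length := by exact_mod_cast hg
        have hcast : ((pos : Int)).toNat = pos := Int.toNat_natCast pos
        have hband : (pos : Int) + PySem.Int.band (pos : Int) (-(pos : Int))
            = ((pos + pvLb pos : Nat) : Int) := by
          rw [pvBand_eq pos hpos]; push_cast; ring
        rw [hcast, hband]
        set tree' := tree.set pos (tree.getD pos 0 + v) with htree'
        have hlen' : tree'.length = tree.length := by simp [htree']
        have hlb := pvLb_pos pos hpos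
        have := ih tree' (pos + pvLb pos) v (by omega) (by omega) j
        rw [this, hlen']
        rw [htree', pvGetD_set]
        have hcov := pvCover pos j hpos
        by_cases hj : j = pos
        · subst hj
          rw [if_pos ⟨rfl, hlt⟩,
            if_neg (show ¬ (j + pvLb j ≤ j ∧ j < tree.length ∧ j - pvLb j < j + pvLb j) by omega),
            if_pos (show j ≤ j ∧ j < tree.length ∧ j - pvLb j < j from ⟨le_refl _, hlt, by omega⟩)]
          ring
        · rw [if_neg (by exact fun hh => hj hh.1)]
          by_cases hc : pos + pvLb pos ≤ j ∧ j < tree.length ∧ j - pvLb j < pos + pvLb pos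
          · rw [if_pos hc, if_pos ?_]
            exact ⟨(hcov.mpr (Or.inr ⟨hc.1, hc.2.2⟩)).1, hc.2.1, (hcov.mpr (Or.inr ⟨hc.1, hc.2.2⟩)).2⟩
          · rw [if_neg hc, if_neg ?_]
            intro hh
            have := hcov.mp ⟨hh.1, hh.2.2⟩
            rcases this with h' | h'
            · exact hj h'
            · exact hc ⟨h'.1, hh.2.1, h'.2⟩
      · rw [if_neg hg]
        have : tree.length ≤ pos := by
          by_contra hc
          exact hg (by exact_mod_cast Nat.lt_of_not_le (by omega))
        rw [if_neg (by omega)]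
        ring

theorem pvPref_getD (tree : List Int) (n : Nat) (S : Nat → Nat → Int)
    (htree : ∀ i, 1 ≤ i → i ≤ n → tree.getD i 0 = S (i - pvLb i) i)
    (hS : ∀ a b c, a ≤ b → b ≤ c → S a c = S a b + S b c) :
    ∀ (fuel k : Nat) (total : Int), k ≤ fuel → k ≤ n →
      pvFenPrefix fuel tree (k : Int) total = total + S 0 k := by
  have hS0 : S 0 0 = 0 := by have := hS 0 0 0 (le_refl _) (le_refl _); omega
  intro fuel
  induction fuel with
  | zero =>
      intro k total hkf hkn
      have : k = 0 := by omega
      subst this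
      unfold pvFenPrefix
      rw [hS0]; ring
  | succ fuel ih =>
      intro k total hkf hkn
      by_cases hk : 0 < k
      · unfold pvFenPrefix
        rw [if_pos (by exact_mod_cast hk)]
        have hlb := pvLb_pos k hk
        have hlble := pvLb_le k hk
        have hband : (k : Int) - PySem.Int.band (k : Int) (-(k : Int))
            = ((k - pvLb k : Nat) : Int) := by
          rw [pvBand_eq k hk]; push_cast [hlble]; ring
        have hcast : ((k : Int)).toNat = k := Int.toNat_natCast k
        rw [hcast, hband]
        rw [ih (k - pvLb k) _ (by omega) (by omega)]
        rw [htree k (by omega) hkn]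
        rw [hS 0 (k - pvLb k) k (by omega) (by omega)]
        ring
      · have : k = 0 := by omega
        subst this
        unfold pvFenPrefix
        rw [if_neg (by norm_num)]
        rw [hS0]; ring

-- the fold of Fenwick updates over the logs, against the weight sum
theorem pvFold_getD (p : (Int × String × Int) → Nat) (n : Nat) :
    ∀ (logs : List (Int × String × Int)) (tree : List Int), tree.length = n + 1 →
    (∀ x ∈ logs, 1 ≤ p x ∧ p x ≤ n) →
    (logs.foldl (fun t x => pvFenUpdate t.length t ((p x : Nat) : Int) x.2.2) tree).length = n + 1 ∧
    ∀ j : Nat,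
      (logs.foldl (fun t x => pvFenUpdate t.length t ((p x : Nat) : Int) x.2.2) tree).getD j 0
        = tree.getD j 0 +
          (logs.map (fun x => if p x ≤ j ∧ j < n + 1 ∧ j - pvLb j < p x then x.2.2 else 0)).sum := by
  intro logs
  induction logs with
  | nil => intro tree hlen _; simpa using hlen
  | cons x logs ih =>
      intro tree hlen hp
      have hx := hp x (by simp)
      have hstep_len : (pvFenUpdate tree.length tree ((p x : Nat) : Int) x.2.2).length = n + 1 := by
        rw [pvUpd_len]; exact hlen
      have hstep := pvUpd_getD tree.length tree (p x) x.2.2 (by omega) (by omega)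
      obtain ⟨ihlen, ihget⟩ := ih (pvFenUpdate tree.length tree ((p x : Nat) : Int) x.2.2)
        hstep_len (fun y hy => hp y (by simp [hy]))
      refine ⟨by simpa using ihlen, ?_⟩
      intro j
      simp only [List.foldl_cons, List.map_cons, List.sum_cons]
      rw [ihget j, hstep j, hlen]
      ring

-- the weighted range sum over the logs, and its additivity
def pvS (p : (Int × String × Int) → Nat) (logs : List (Int × String × Int)) (a b : Nat) : Int :=
  (logs.map (fun x => if a < p x ∧ p x ≤ b then x.2.2 else 0)).sum

theorem pvS_split (p : (Int × String × Int) → Nat) (logs : List (Int × String × Int))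
    (a b c : Nat) (h1 : a ≤ b) (h2 : b ≤ c) :
    pvS p logs a c = pvS p logs a b + pvS p logs b c := by
  unfold pvS
  induction logs with
  | nil => simp
  | cons x logs ih =>
      simp only [List.map_cons, List.sum_cons]
      rw [ih]
      have hsplit : (if a < p x ∧ p x ≤ c then x.2.2 else 0)
          = (if a < p x ∧ p x ≤ b then x.2.2 else 0) + (if b < p x ∧ p x ≤ c then x.2.2 else 0) := by
        split_ifs <;> omega
      rw [hsplit]; ring

-- date_map as an association list: exactly (date, index+1) over the enumeration
theorem pvDateMap_items (xs : List String) (h : xs.Nodup) :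
    ((PySem.List.enumerate xs).foldl (fun d p => d.insert p.2 (p.1 + 1))
        (PySem.Dict.empty : PySem.Dict String Int)).items
      = (PySem.List.enumerate xs).map (fun p => (p.2, p.1 + 1)) := by
  have := PySem.Dict.items_foldl_insert_fresh (PySem.List.enumerate xs)
    (fun p => p.2) (fun p => p.1 + 1) PySem.Dict.empty
    (fun a _ => PySem.Dict.contains_empty _)
    (by rw [PySem.List.map_snd_enumerate]; exact h)
  simp at this
  exact this

theorem pvDateMap_keys (xs : List String) (h : xs.Nodup) :
    ((PySem.List.enumerate xs).foldl (fun d p => d.insert p.2 (p.1 + 1))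
        (PySem.Dict.empty : PySem.Dict String Int)).keys = xs := by
  simp only [PySem.Dict.keys, pvDateMap_items xs h, List.map_map]
  simpa [Function.comp_def] using PySem.List.map_snd_enumerate xs 0

theorem pvDateMap_getD (xs : List String) (h : xs.Nodup) (i : Nat) (hi : i < xs.length) :
    ((PySem.List.enumerate xs).foldl (fun d p => d.insert p.2 (p.1 + 1))
        (PySem.Dict.empty : PySem.Dict String Int)).getD xs[i] 0 = (i : Int) + 1 := by
  apply PySem.Dict.getD_of_mem_items
  · rw [pvDateMap_items xs h]
    refine List.mem_map.mpr ⟨((i : Int), xs[i]), ?_, rfl⟩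
    rw [PySem.List.mem_enumerate_iff]
    exact ⟨i, hi, by simp⟩
  · rw [pvDateMap_keys xs h]; exact h

theorem pvDateMap_contains (xs : List String) (h : xs.Nodup) (d : String) :
    ((PySem.List.enumerate xs).foldl (fun d p => d.insert p.2 (p.1 + 1))
        (PySem.Dict.empty : PySem.Dict String Int)).contains d = decide (d ∈ xs) := by
  rw [PySem.Dict.contains_eq_decide_mem_keys, pvDateMap_keys xs h]

-- the totals dict: lookup = sum of the costs logged at that date
theorem pvTotals_getD_gen (c : String) :
    ∀ (logs : List (Int × String × Int)) (d : PySem.Dict String Int),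
    (logs.foldl (fun d x => d.insert x.2.1 (d.getD x.2.1 0 + x.2.2)) d).getD c 0
      = d.getD c 0 + (logs.map (fun x => if x.2.1 = c then x.2.2 else 0)).sum := by
  intro logs
  induction logs with
  | nil => intro d; simp
  | cons x logs ih =>
      intro d
      simp only [List.foldl_cons, List.map_cons, List.sum_cons]
      rw [ih]
      rw [PySem.Dict.getD_insert]
      by_cases hc : c = x.2.1
      · subst hc
        rw [if_pos rfl, if_pos rfl]; ring
      · rw [if_neg hc, if_neg (fun hh => hc hh.symm)]; ring

theorem pvTotals_getD (logs : List (Int × String × Int)) (c : String) :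
    (pvTotals logs).getD c 0 = (logs.map (fun x => if x.2.1 = c then x.2.2 else 0)).sum := by
  unfold pvTotals
  rw [pvTotals_getD_gen c logs PySem.Dict.empty, PySem.Dict.getD_empty]
  ring

theorem pvTotals_keys (logs : List (Int × String × Int)) :
    (pvTotals logs).keys = PySem.Set.ofList (pvDates logs) := by
  unfold pvTotals
  have h := PySem.Dict.keys_foldl_insert_key (ν := Int) logs (fun x => x.2.1)
    (fun d x => d.getD x.2.1 0 + x.2.2) PySem.Dict.empty
  rw [h, PySem.Dict.keys_empty]
  rfl

-- the cumulative sweep of B: running = prefix sum; the two dicts hold prefix sums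
theorem pvSweep (totals : PySem.Dict String Int) (xs : List String) (hnd : xs.Nodup) :
    ∀ m, m ≤ xs.length →
      (((xs.take m).foldl (pvSweepStep totals) (PySem.Dict.empty, PySem.Dict.empty, 0)).2.2
          = ((xs.take m).map (fun d => totals.getD d 0)).sum)
      ∧ (((xs.take m).foldl (pvSweepStep totals) (PySem.Dict.empty, PySem.Dict.empty, 0)).2.1.keys
          = xs.take m)
      ∧ (∀ j, ∀ hj : j < xs.length, j < m →
          ((xs.take m).foldl (pvSweepStep totals) (PySem.Dict.empty, PySem.Dict.empty, 0)).1.getD xs[j] 0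
            = ((xs.take j).map (fun d => totals.getD d 0)).sum
          ∧ ((xs.take m).foldl (pvSweepStep totals) (PySem.Dict.empty, PySem.Dict.empty, 0)).2.1.getD xs[j] 0
            = ((xs.take (j+1)).map (fun d => totals.getD d 0)).sum) := by
  intro m
  induction m with
  | zero =>
      intro _
      refine ⟨by simp, by simp [PySem.Dict.keys_empty], ?_⟩
      intro j hj hcon
      omega
  | succ m ih =>
      intro hm1
      have hm : m < xs.length := by omega
      obtain ⟨h22, hkeys, hget⟩ := ih (by omega)
      have hnotmem : xs[m] ∉ xs.take m := by
        intro hmem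
        obtain ⟨j, hjlen, hje⟩ := List.mem_iff_getElem.mp hmem
        have hjlt : j < m := by
          have := hjlen; simp [List.length_take] at this; omega
        have : xs[j]'(by omega) = xs[m] := by
          rw [← hje]; exact (List.getElem_take).symm
        have := (hnd.getElem_inj_iff).mp this
        omega
      have hconthru : (((xs.take m).foldl (pvSweepStep totals)
          (PySem.Dict.empty, PySem.Dict.empty, 0)).2.1).contains xs[m] = false := by
        rw [PySem.Dict.contains_eq_decide_mem_keys, hkeys]
        simpa using hnotmem
      have hstep22 : ∀ st d, (pvSweepStep totals st d).2.2 = st.2.2 + totals.getD d 0 :=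
        fun _ _ => rfl
      have hstep21 : ∀ st d, (pvSweepStep totals st d).2.1
          = st.2.1.insert d (st.2.2 + totals.getD d 0) := fun _ _ => rfl
      have hstep1 : ∀ st d, (pvSweepStep totals st d).1 = st.1.insert d st.2.2 :=
        fun _ _ => rfl
      rw [List.take_succ_eq_append_getElem hm, List.foldl_append]
      simp only [List.foldl_cons, List.foldl_nil]
      refine ⟨?_, ?_, ?_⟩
      · rw [hstep22, h22, List.map_append, List.sum_append]
        simp
      · rw [hstep21, PySem.Dict.keys_insert_of_not_contains _ _ hconthru, hkeys]
      · intro j hj hjm1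
        by_cases hjm : j < m
        · have hne : xs[j] ≠ xs[m] := by
            intro hh
            have := (hnd.getElem_inj_iff).mp hh
            omega
          constructor
          · rw [hstep1, PySem.Dict.getD_insert, if_neg hne]
            exact (hget j hj hjm).1
          · rw [hstep21, PySem.Dict.getD_insert, if_neg hne]
            exact (hget j hj hjm).2
        · have hje : j = m := by omega
          subst hje
          constructor
          · rw [hstep1, PySem.Dict.getD_insert, if_pos rfl]
            exact h22
          · rw [hstep21, PySem.Dict.getD_insert, if_pos rfl]
            rw [List.take_succ_eq_append_getElem hj, List.map_append, List.sum_append, h22]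
            simp

-- ===== VERDICT (by name: the statement is the Claim_ definition above) =====
theorem maintenance_costs_spec : Claim_equal_maintenance_costs := by
  intro logs queries _dom
  unfold Spec_maintenance_costs maintenance_costs maintenance_costs_alt
  -- shared structure of the two programs
  have hpw : List.Pairwise (· < ·) (pvSortedDates logs) :=
    PySem.List.sorted_ofList_pairwise_lt (pvDates logs)
  have hnd : (pvSortedDates logs).Nodup := hpw.imp ne_of_lt
  set xs := pvSortedDates logs with hxsdef
  set n := xs.length with hndef
  have hmemxs : ∀ d, d ∈ xs ↔ d ∈ pvDates logs := by
    intro d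
    rw [hxsdef]
    unfold pvSortedDates
    rw [PySem.List.mem_sorted]
    exact PySem.Set.mem_ofList _ d
  have hkeysB : PySem.List.sorted (pvTotals logs).keys (fun d => d) = xs := by
    rw [pvTotals_keys]; rfl
  have hdm_getD : ∀ d ∈ xs, (pvDateMap logs).getD d 0 = ((xs.idxOf d + 1 : Nat) : Int) := by
    intro d hd
    have hi := List.idxOf_lt_length_of_mem hd
    have h := pvDateMap_getD xs hnd (xs.idxOf d) hi
    rw [List.getElem_idxOf hi] at h
    rw [hxsdef] at h ⊢
    unfold pvDateMap
    rw [h]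
    push_cast; ring
  have hdm_contains : ∀ d, (pvDateMap logs).contains d = decide (d ∈ xs) := by
    intro d
    unfold pvDateMap
    exact pvDateMap_contains xs hnd d
  -- position function: 1-based index of a log's date in the sorted date list
  set P : (Int × String × Int) → Nat := fun x => xs.idxOf x.2.1 + 1 with hPdef
  have hlogdate : ∀ x : (Int × String × Int), x ∈ logs → x.2.1 ∈ xs := by
    intro x hx
    rw [hmemxs]
    exact List.mem_map.mpr ⟨x, hx, rfl⟩
  have hPrange : ∀ x ∈ logs, 1 ≤ P x ∧ P x ≤ n := by
    intro x hx
    have hP : P x = xs.idxOf x.2.1 + 1 := rfl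
    have := List.idxOf_lt_length_of_mem (hlogdate x hx)
    omega
  -- the fenwick fold, rewritten through the position function
  have hfen_eq : pvFen logs = logs.foldl
      (fun t x => pvFenUpdate t.length t ((P x : Nat) : Int) x.2.2)
      (List.replicate (n + 1) (0 : Int)) := by
    unfold pvFen
    exact PySem.List.foldl_congr_mem logs _ _ _
      (fun acc x hx => by rw [hdm_getD x.2.1 (hlogdate x hx)])
  have hfold := pvFold_getD P n logs (List.replicate (n + 1) (0 : Int)) (by simp) hPrange
  have hrep0 : ∀ j : Nat, (List.replicate (n+1) (0:Int)).getD j 0 = 0 := by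
    intro j
    simp [List.getD_eq_getElem?_getD, List.getElem?_replicate]
    split <;> rfl
  have hfen_getD : ∀ i, 1 ≤ i → i ≤ n → (pvFen logs).getD i 0 = pvS P logs (i - pvLb i) i := by
    intro i h1 h2
    rw [hfen_eq, hfold.2 i, hrep0 i]
    unfold pvS
    rw [zero_add]
    congr 1
    apply List.map_eq_map_iff.mpr
    intro x _
    exact if_congr (by omega) rfl rfl
  -- B's sweep state over the same sorted list
  have hsw_eq : pvSweepSt logs
      = xs.foldl (pvSweepStep (pvTotals logs)) (PySem.Dict.empty, PySem.Dict.empty, 0) := by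
    unfold pvSweepSt
    rw [hkeysB]
  have hsw := pvSweep (pvTotals logs) xs hnd n (le_refl _)
  rw [hndef, List.take_length] at hsw
  obtain ⟨hsw_run, hsw_keys, hsw_getD⟩ := hsw
  have hsw_contains : ∀ d, (pvSweepSt logs).2.1.contains d = decide (d ∈ xs) := by
    intro d
    rw [hsw_eq, PySem.Dict.contains_eq_decide_mem_keys, hsw_keys]
  -- bridge: the Fenwick weighted sum pvS P logs 0 k equals B's prefix sums of totals
  have hPS : ∀ k, k ≤ n → pvS P logs 0 k
      = ((xs.take k).map (fun d => (pvTotals logs).getD d 0)).sum := by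
    intro k
    induction k with
    | zero =>
        intro _
        have h0 := pvS_split P logs 0 0 0 (le_refl _) (le_refl _)
        simp only [List.take_zero, List.map_nil, List.sum_nil]
        omega
    | succ k ihk =>
        intro hk1
        have hk : k < n := by omega
        rw [pvS_split P logs 0 k (k+1) (by omega) (by omega), ihk (by omega)]
        rw [List.take_succ_eq_append_getElem hk]
        simp only [List.map_append, List.sum_append, List.map_cons, List.sum_cons,
          List.map_nil, List.sum_nil, add_zero]
        congr 1
        rw [pvTotals_getD logs xs[k]]
        unfold pvS
        apply congrArg List.sum
        apply List.map_eq_map_iff.mpr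
        intro x hx
        have hdx : x.2.1 ∈ xs := hlogdate x hx
        have hP : P x = xs.idxOf x.2.1 + 1 := rfl
        have hiff : (k < P x ∧ P x ≤ k + 1) ↔ x.2.1 = xs[k] := by
          constructor
          · intro hh
            have hik : xs.idxOf x.2.1 = k := by omega
            subst hik
            exact (List.getElem_idxOf (List.idxOf_lt_length_of_mem hdx)).symm
          · intro hh
            have hik : xs.idxOf x.2.1 = k := by
              rw [hh]
              exact hnd.idxOf_getElem k hk
            omega
        exact if_congr hiff rfl rfl
  -- the per-query values agree
  apply List.map_eq_map_iff.mpr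
  intro q _
  rw [hdm_contains q.1, hdm_contains q.2, hsw_contains q.1, hsw_contains q.2]
  by_cases hin : q.1 ∈ xs ∧ q.2 ∈ xs
  · rw [if_pos (by simp [hin.1, hin.2]), if_pos (by simp [hin.1, hin.2])]
    have hi1 := List.idxOf_lt_length_of_mem hin.1
    have hi2 := List.idxOf_lt_length_of_mem hin.2
    rw [hdm_getD q.1 hin.1, hdm_getD q.2 hin.2]
    unfold pvRangeSum
    have hc2 : ((((xs.idxOf q.2) + 1 : Nat) : Int)).toNat = xs.idxOf q.2 + 1 :=
      Int.toNat_natCast _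
    have hc1 : (((xs.idxOf q.1 + 1 : Nat) : Int) - 1) = ((xs.idxOf q.1 : Nat) : Int) := by
      push_cast; ring
    rw [hc2, hc1, Int.toNat_natCast]
    rw [pvPref_getD (pvFen logs) n (pvS P logs) hfen_getD (pvS_split P logs)
      (xs.idxOf q.2 + 1) (xs.idxOf q.2 + 1) 0 (le_refl _) (by omega)]
    rw [pvPref_getD (pvFen logs) n (pvS P logs) hfen_getD (pvS_split P logs)
      (xs.idxOf q.1) (xs.idxOf q.1) 0 (le_refl _) (by omega)]
    rw [hsw_eq]
    have hB2 := (hsw_getD (xs.idxOf q.2) hi2 hi2).2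
    have hB1 := (hsw_getD (xs.idxOf q.1) hi1 hi1).1
    rw [List.getElem_idxOf hi2] at hB2
    rw [List.getElem_idxOf hi1] at hB1
    rw [hB2, hB1]
    rw [hPS (xs.idxOf q.2 + 1) (by omega), hPS (xs.idxOf q.1) (by omega)]
    ring
  · have hfalse : (decide (q.1 ∈ xs) && decide (q.2 ∈ xs)) = false := by
      rcases (not_and_or.mp hin) with h | h <;> simp [h]
    rw [if_neg (by simp [hfalse]), if_neg (by simp [hfalse])]
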